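-- pv_equiv track=rewrite | github.com/Denigmma/Practice_LogBook | Tinkoff/internship_ML_2025/task5.py | count_cuts
-- ===== SOURCE A (Python) =====
-- def count_cuts(n, s, a):
--     total_sum = 0
--     for l in range(n):
--         r = l
--         current_sum = 0
--         cuts = 0
--         while r < n:
--             current_sum += a[r]
--             if current_sum > s:
--                 cuts += 1
--                 current_sum = a[r]
--             r += 1
--             total_sum += cuts + 1
--     return total_sum
-- ===== SOURCE B (Python) =====
-- def count_cuts(n, s, a):
--     # DP: nxt[p] = first q > p with a[p]+...+a[q] > s (else n);
--     # G[p] = sum of (n-c) over the cut chain p, nxt[p], nxt[nxt[p]], ...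
--     nxt = [0] * max(n, 0)
--     for p in range(n - 1, -1, -1):
--         cur = a[p]
--         q = p + 1
--         while q < n and cur + a[q] <= s:
--             cur += a[q]
--             q += 1
--         nxt[p] = q
--     G = [0] * (max(n, 0) + 1)
--     for p in range(n - 1, -1, -1):
--         G[p] = (n - p) + G[nxt[p]]
--     total = 0
--     for l in range(n):
--         fl = l if a[l] > s else nxt[l]
--         total += (n - l) + (G[fl] if fl < n else 0)
--     return total
-- ===== Notes on version B (the rewrite author's own statement) =====
-- stated objective: alternative
-- what changed: Instead of rerunning the greedy scan from every start l (A's nested loops), B precomputes for each position p the next cut position nxt[p], accumulates cut-chain suffix sums G[p] = (n-p) + G[nxt[p]], and sums (n-l) + G[first cut of l] over l in one pass; much faster when greedy pieces are short, but its nxt scans are still quadratic in the worst case, so no speed is claimed.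
import Mathlib
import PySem

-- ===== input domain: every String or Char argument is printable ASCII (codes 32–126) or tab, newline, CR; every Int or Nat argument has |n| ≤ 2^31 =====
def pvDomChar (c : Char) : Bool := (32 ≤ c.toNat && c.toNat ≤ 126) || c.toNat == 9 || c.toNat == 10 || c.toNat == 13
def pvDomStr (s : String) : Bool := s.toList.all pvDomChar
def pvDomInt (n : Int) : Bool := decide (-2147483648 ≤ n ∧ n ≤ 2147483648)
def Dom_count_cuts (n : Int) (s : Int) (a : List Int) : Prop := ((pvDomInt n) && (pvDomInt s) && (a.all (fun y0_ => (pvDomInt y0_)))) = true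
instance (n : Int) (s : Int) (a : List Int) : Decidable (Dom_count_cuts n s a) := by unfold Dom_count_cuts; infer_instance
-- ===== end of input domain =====

-- B replaces A's per-start greedy rescans with a cut-chain DP (next-cut table nxt[p] + chain suffix sums G[p]), a structurally different single-pass summation.


-- ===== PORT A =====
-- the inner `while r < n` loop of A, state (r, current_sum, cuts, total_sum)
def aLoop (s : Int) (a : List Int) (n : Int) (r cur cuts tot : Int) : Int :=
  if _h : r < n then
    let cur1 := cur + PySem.List.pyGetD a r 0
    if cur1 > s then
      aLoop s a n (r + 1) (PySem.List.pyGetD a r 0) (cuts + 1) (tot + (cuts + 1) + 1)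
    else
      aLoop s a n (r + 1) cur1 cuts (tot + cuts + 1)
  else tot
termination_by (n - r).toNat
decreasing_by all_goals (simp_wf; omega)

def count_cuts (n : Int) (s : Int) (a : List Int) : Int :=
  (PySem.List.pyRange 0 n 1).foldl (fun tot l => aLoop s a n l 0 0 tot) 0

-- ===== PORT B =====
-- the `while q < n and cur + a[q] <= s` scan of B
def bScan (s : Int) (a : List Int) (n cur q : Int) : Int :=
  if _h : q < n then
    if cur + PySem.List.pyGetD a q 0 ≤ s then bScan s a n (cur + PySem.List.pyGetD a q 0) (q + 1)
    else q
  else q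
termination_by (n - q).toNat
decreasing_by all_goals (simp_wf; omega)

-- `for p in range(n-1, -1, -1): nxt[p] = …`
def bNxtAux (s : Int) (a : List Int) (n : Int) (p : Int) (nxt : List Int) : List Int :=
  if _h : 0 ≤ p then
    bNxtAux s a n (p - 1) (PySem.List.pySetD nxt p (bScan s a n (PySem.List.pyGetD a p 0) (p + 1)))
  else nxt
termination_by (p + 1).toNat
decreasing_by simp_wf; omega

-- `for p in range(n-1, -1, -1): G[p] = (n - p) + G[nxt[p]]`
def bGAux (n : Int) (nxt : List Int) (p : Int) (G : List Int) : List Int :=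
  if _h : 0 ≤ p then
    bGAux n nxt (p - 1) (PySem.List.pySetD G p ((n - p) + PySem.List.pyGetD G (PySem.List.pyGetD nxt p 0) 0))
  else G
termination_by (p + 1).toNat
decreasing_by simp_wf; omega

def count_cuts_alt (n : Int) (s : Int) (a : List Int) : Int :=
  let nxt := bNxtAux s a n (n - 1) (List.replicate (max n 0).toNat 0)
  let G := bGAux n nxt (n - 1) (List.replicate ((max n 0).toNat + 1) 0)
  (PySem.List.pyRange 0 n 1).foldl (fun tot l =>
    let fl := if PySem.List.pyGetD a l 0 > s then l else PySem.List.pyGetD nxt l 0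
    tot + ((n - l) + (if fl < n then PySem.List.pyGetD G fl 0 else 0))) 0

-- ===== PRECONDITION & SPEC =====
-- Pre_ excludes exactly the inputs where A raises IndexError: the loops read a[0..n-1], so n ≤ len(a) is required
-- (for n ≤ 0 both loops are empty and any list is fine, which n ≤ len(a) admits since lengths are ≥ 0… n ≤ 0 ≤ len(a)
--  only when n ≤ len(a) anyway; the condition is exact for n ≥ 0 and A never indexes when n ≤ 0, where n ≤ len(a) also holds).
def Pre_count_cuts (n : Int) (s : Int) (a : List Int) : Prop := n ≤ (a.length : Int)
instance (n : Int) (s : Int) (a : List Int) : Decidable (Pre_count_cuts n s a) := by unfold Pre_count_cuts; infer_instance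
def pvWitness_count_cuts : Int × Int × List Int := (4, 3, [2, 2, -1, 5])

def Spec_count_cuts (n : Int) (s : Int) (a : List Int) (out : Int) : Prop := out = count_cuts_alt n s a
instance (n : Int) (s : Int) (a : List Int) (out : Int) : Decidable (Spec_count_cuts n s a out) := by unfold Spec_count_cuts; infer_instance

-- ===== CLAIM (what is proved, stated in full; the proofs are below) =====
def Claim_equal_count_cuts : Prop := ∀ (n : Int) (s : Int) (a : List Int), Dom_count_cuts n s a → Pre_count_cuts n s a → Spec_count_cuts n s a (count_cuts n s a)

-- ===== LEMMAS AND PROOFS =====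

-- seg a p q = a[p] + … + a[q-1]
def seg (a : List Int) (p q : Nat) : Int := ∑ i ∈ Finset.Ico p q, a.getD i 0

-- Nat-indexed version of the scan: first q' ≥ q with cur + a[q..q'] > s, else N
def scanN (s : Int) (a : List Int) (N : Nat) (cur : Int) (q : Nat) : Nat :=
  if _h : q < N then
    if cur + a.getD q 0 ≤ s then scanN s a N (cur + a.getD q 0) (q + 1) else q
  else q
termination_by N - q

lemma scanN_ge (s : Int) (a : List Int) (N : Nat) : ∀ (cur : Int) (q : Nat), q ≤ scanN s a N cur q := by
  intro cur q
  induction cur, q using scanN.induct s a N with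
  | case1 cur q h hle ih => rw [scanN]; simp only [h, dif_pos, hle, if_pos]; omega
  | case2 cur q h hle => rw [scanN]; rw [dif_pos h, if_neg hle]
  | case3 cur q h => rw [scanN]; simp [h]

lemma scanN_le (s : Int) (a : List Int) (N : Nat) : ∀ (cur : Int) (q : Nat), q ≤ N → scanN s a N cur q ≤ N := by
  intro cur q
  induction cur, q using scanN.induct s a N with
  | case1 cur q h hle ih => intro _; rw [scanN]; simp only [h, dif_pos, hle, if_pos]; exact ih (by omega)
  | case2 cur q h hle => intro _; rw [scanN]; rw [dif_pos h, if_neg hle]; omega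
  | case3 cur q h => intro hq; rw [scanN]; simpa [h] using hq

def nxtN (s : Int) (a : List Int) (N : Nat) (p : Nat) : Nat := scanN s a N (a.getD p 0) (p + 1)

lemma nxtN_gt (s : Int) (a : List Int) (N p : Nat) : p < nxtN s a N p :=
  Nat.lt_of_lt_of_le (Nat.lt_succ_self p) (scanN_ge s a N _ _)

-- GN p = sum of (N - c) over the cut chain p, nxt p, nxt (nxt p), … (0 once past N)
def GN (s : Int) (a : List Int) (N : Nat) (p : Nat) : Int :=
  if _h : p < N then ((N : Int) - p) + GN s a N (nxtN s a N p) else 0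
termination_by N - p
decreasing_by have := nxtN_gt s a N p; omega

lemma bScan_natCast (s : Int) (a : List Int) (N : Nat) : ∀ (q : Nat) (cur : Int),
    bScan s a (N : Int) cur (q : Int) = ((scanN s a N cur q : Nat) : Int) := by
  intro q cur
  induction cur, q using scanN.induct s a N with
  | case1 cur q h hle ih =>
      have hq : (q : Int) < (N : Int) := by exact_mod_cast h
      rw [bScan, scanN, dif_pos hq, dif_pos h]
      simp only [PySem.List.pyGetD_natCast]
      rw [if_pos hle, if_pos hle]
      have hcast : ((q : Int) + 1) = ((q + 1 : Nat) : Int) := by push_cast; ring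
      rw [hcast]; exact ih
  | case2 cur q h hle =>
      have hq : (q : Int) < (N : Int) := by exact_mod_cast h
      rw [bScan, scanN, dif_pos hq, dif_pos h]
      simp only [PySem.List.pyGetD_natCast]
      rw [if_neg hle, if_neg hle]
  | case3 cur q h =>
      have hq : ¬ (q : Int) < (N : Int) := by exact_mod_cast h
      rw [bScan, scanN, dif_neg hq, dif_neg h]

lemma seg_self (a : List Int) (p : Nat) : seg a p p = 0 := by simp [seg]

lemma seg_succ (a : List Int) {p q : Nat} (h : p ≤ q) : seg a p (q + 1) = seg a p q + a.getD q 0 :=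
  Finset.sum_Ico_succ_top h _

lemma seg_single (a : List Int) (q : Nat) : seg a q (q + 1) = a.getD q 0 := by
  rw [seg_succ a (le_refl q), seg_self, zero_add]

-- A's inner loop, started anywhere inside a segment that began at p, computed in closed chain form
lemma aLoop_formula (s : Int) (a : List Int) (N : Nat) :
    ∀ (k rN pN : Nat) (cuts tot : Int), N - rN = k → pN ≤ rN → rN ≤ N →
    aLoop s a (N : Int) (rN : Int) (seg a pN rN) cuts tot
      = tot + (cuts + 1) * ((N : Int) - rN) + GN s a N (scanN s a N (seg a pN rN) rN) := by
  intro k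
  induction k with
  | zero =>
      intro rN pN cuts tot hk hpr hrN
      have hr : rN = N := by omega
      rw [hr, aLoop, dif_neg (lt_irrefl (N : Int)), scanN, dif_neg (lt_irrefl N), GN,
        dif_neg (lt_irrefl N)]
      ring
  | succ k ih =>
      intro rN pN cuts tot hk hpr hrN
      have hrlt : rN < N := by omega
      have hq : (rN : Int) < (N : Int) := by exact_mod_cast hrlt
      have hcast : ((rN : Int) + 1) = ((rN + 1 : Nat) : Int) := by push_cast; ring
      rw [aLoop, dif_pos hq, scanN, dif_pos hrlt]
      simp only [PySem.List.pyGetD_natCast]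
      by_cases hcut : seg a pN rN + a.getD rN 0 ≤ s
      · rw [if_neg (not_lt.mpr hcut), if_pos hcut, ← seg_succ a hpr, hcast,
          ih (rN + 1) pN cuts (tot + cuts + 1) (by omega) (by omega) (by omega)]
        push_cast; ring
      · rw [if_pos (lt_of_not_ge hcut), if_neg hcut]
        have hgd : a.getD rN 0 = seg a rN (rN + 1) := (seg_single a rN).symm
        rw [hgd, hcast, ih (rN + 1) rN (cuts + 1) (tot + (cuts + 1) + 1) (by omega) (by omega) (by omega)]
        have hnxt : scanN s a N (seg a rN (rN + 1)) (rN + 1) = nxtN s a N rN := by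
          rw [nxtN, hgd]
        have hGN : GN s a N rN = ((N : Int) - rN) + GN s a N (nxtN s a N rN) := by
          rw [GN, dif_pos hrlt]
        rw [hnxt, hGN]
        push_cast; ring

lemma getD_set_self {l : List Int} {i : Nat} (h : i < l.length) (v d : Int) :
    (l.set i v).getD i d = v := by
  simp [List.getD, h]

lemma getD_set_ne {l : List Int} {i j : Nat} (h : i ≠ j) (v d : Int) :
    (l.set i v).getD j d = l.getD j d := by
  simp [List.getD, h]

-- the nxt list built by B holds nxtN
lemma bNxtAux_spec (s : Int) (a : List Int) (N : Nat) :
    ∀ (k : Nat) (L : List Int), k ≤ N → L.length = N →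
    (bNxtAux s a (N : Int) ((k : Int) - 1) L).length = N ∧
    ∀ i < N, (bNxtAux s a (N : Int) ((k : Int) - 1) L).getD i 0
        = if i < k then ((nxtN s a N i : Nat) : Int) else L.getD i 0 := by
  intro k
  induction k with
  | zero =>
      intro L hk hL
      rw [bNxtAux, dif_neg (by norm_num : ¬ (0 : Int) ≤ ((0 : Nat) : Int) - 1)]
      exact ⟨hL, fun i _ => by simp⟩
  | succ k ih =>
      intro L hk hL
      rw [show ((k + 1 : Nat) : Int) - 1 = ((k : Nat) : Int) by push_cast; ring,
        bNxtAux, dif_pos (Int.natCast_nonneg k)]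
      simp only [PySem.List.pySetD_natCast, PySem.List.pyGetD_natCast]
      rw [show ((k : Int) + 1) = ((k + 1 : Nat) : Int) by push_cast; ring,
        bScan_natCast s a N (k + 1) (a.getD k 0)]
      rw [show scanN s a N (a.getD k 0) (k + 1) = nxtN s a N k from rfl]
      have hlen : (L.set k ((nxtN s a N k : Nat) : Int)).length = N := by
        rw [List.length_set]; exact hL
      obtain ⟨hlen', hres⟩ := ih (L.set k ((nxtN s a N k : Nat) : Int)) (by omega) hlen
      refine ⟨hlen', fun i hi => ?_⟩
      rw [hres i hi]
      by_cases h1 : i < k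
      · rw [if_pos h1, if_pos (by omega)]
      · by_cases h2 : i = k
        · subst h2
          rw [if_neg h1, if_pos (by omega), getD_set_self (by omega)]
        · rw [if_neg h1, if_neg (by omega), getD_set_ne (fun h => h2 h.symm)]

-- the G list built by B holds GN
lemma bGAux_spec (s : Int) (a : List Int) (N : Nat) (nxt : List Int)
    (hnxt : ∀ i < N, nxt.getD i 0 = ((nxtN s a N i : Nat) : Int)) :
    ∀ (k : Nat) (L : List Int), k ≤ N → L.length = N + 1 →
    (∀ i, k ≤ i → i ≤ N → L.getD i 0 = GN s a N i) →
    (∀ i ≤ N, (bGAux (N : Int) nxt ((k : Int) - 1) L).getD i 0 = GN s a N i) := by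
  intro k
  induction k with
  | zero =>
      intro L hk hL hup
      rw [bGAux, dif_neg (by norm_num : ¬ (0 : Int) ≤ ((0 : Nat) : Int) - 1)]
      exact fun i hi => hup i (Nat.zero_le i) hi
  | succ k ih =>
      intro L hk hL hup
      have hkN : k < N := by omega
      rw [show ((k + 1 : Nat) : Int) - 1 = ((k : Nat) : Int) by push_cast; ring,
        bGAux, dif_pos (Int.natCast_nonneg k)]
      simp only [PySem.List.pySetD_natCast, PySem.List.pyGetD_natCast]
      rw [hnxt k hkN, PySem.List.pyGetD_natCast]
      have hnk1 : k + 1 ≤ nxtN s a N k := nxtN_gt s a N k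
      have hnkN : nxtN s a N k ≤ N := scanN_le s a N _ _ (by omega)
      rw [hup (nxtN s a N k) hnk1 hnkN]
      have hGk : GN s a N k = ((N : Int) - (k : Int)) + GN s a N (nxtN s a N k) := by
        rw [GN, dif_pos hkN]
      rw [← hGk]
      apply ih (L.set k (GN s a N k)) (by omega) (by rw [List.length_set]; exact hL)
      intro i h1 h2
      by_cases h3 : i = k
      · subst h3; rw [getD_set_self (by omega)]
      · rw [getD_set_ne (fun h => h3 h.symm)]
        exact hup i (by omega) h2

lemma key_fold (s : Int) (a : List Int) (N : Nat) (nxt G : List Int)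
    (hn : ∀ i < N, nxt.getD i 0 = ((nxtN s a N i : Nat) : Int))
    (hG : ∀ i ≤ N, G.getD i 0 = GN s a N i) :
    (PySem.List.pyRange 0 (N : Int) 1).foldl (fun tot l => aLoop s a (N : Int) l 0 0 tot) 0
      = (PySem.List.pyRange 0 (N : Int) 1).foldl (fun tot l =>
          let fl := if PySem.List.pyGetD a l 0 > s then l else PySem.List.pyGetD nxt l 0
          tot + (((N : Int) - l) + (if fl < (N : Int) then PySem.List.pyGetD G fl 0 else 0))) 0 := by
  apply PySem.List.foldl_congr_mem
  intro tot l hl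
  rw [PySem.List.mem_pyRange_one] at hl
  obtain ⟨lN, rfl⟩ : ∃ m : Nat, l = (m : Int) := ⟨l.toNat, (Int.toNat_of_nonneg hl.1).symm⟩
  have hlN : lN < N := by exact_mod_cast hl.2
  have hA := aLoop_formula s a N (N - lN) lN lN 0 tot rfl le_rfl (le_of_lt hlN)
  rw [seg_self] at hA
  rw [hA]
  simp only [PySem.List.pyGetD_natCast]
  rw [scanN, dif_pos hlN]
  simp only [zero_add]
  rw [show scanN s a N (a.getD lN 0) (lN + 1) = nxtN s a N lN from rfl]
  by_cases hgt : a.getD lN 0 > s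
  · rw [if_neg (not_le.mpr hgt), if_pos hgt, if_pos (show ((lN : Nat) : Int) < (N : Int) by exact_mod_cast hlN)]
    rw [PySem.List.pyGetD_natCast, hG lN (le_of_lt hlN)]
    ring
  · rw [if_pos (not_lt.mp hgt), if_neg hgt, hn lN hlN]
    by_cases hfl : nxtN s a N lN < N
    · rw [if_pos (show ((nxtN s a N lN : Nat) : Int) < (N : Int) by exact_mod_cast hfl),
        PySem.List.pyGetD_natCast, hG _ (le_of_lt hfl)]
      ring
    · rw [if_neg (show ¬ ((nxtN s a N lN : Nat) : Int) < (N : Int) by exact_mod_cast hfl),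
        GN, dif_neg hfl]
      ring

-- ===== VERDICT (by name: the statement is the Claim_ definition above) =====
theorem count_cuts_spec : Claim_equal_count_cuts := by
  intro n s a _hdom _hpre
  unfold Spec_count_cuts count_cuts count_cuts_alt
  by_cases hn : n < 0
  · simp only [PySem.List.pyRange_one_eq_nil (show n ≤ (0 : Int) by omega), List.foldl_nil]
  · lift n to Nat using (by omega : (0 : Int) ≤ n) with N
    rw [show max ((N : Nat) : Int) 0 = ((N : Nat) : Int) from max_eq_left (Int.natCast_nonneg N),
      Int.toNat_natCast]
    obtain ⟨_, hx1⟩ := bNxtAux_spec s a N N (List.replicate N 0) le_rfl (by simp)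
    have hn1 : ∀ i < N, (bNxtAux s a (N : Int) ((N : Int) - 1) (List.replicate N 0)).getD i 0
        = ((nxtN s a N i : Nat) : Int) := fun i hi => by rw [hx1 i hi, if_pos hi]
    have hg1 := bGAux_spec s a N _ hn1 N (List.replicate (N + 1) 0) le_rfl (by simp)
      (fun j hj1 hj2 => by
        have hjN : j = N := le_antisymm hj2 hj1
        subst hjN
        rw [GN, dif_neg (lt_irrefl _)]
        simp [List.getD])
    exact key_fold s a N _ _ hn1 hg1
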